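-- pv_equiv track=rewrite | github.com/rtomagnini/Yamtrack | src/integrations/webhooks/emby.py | get_mal_id_from_tvdb
-- ===== SOURCE A (Python) =====
-- def get_mal_id_from_tvdb(mapping_data, tvdb_id, season_number, episode_number):
--     """Find the appropriate MAL ID based on TVDB id."""
--     matching_entries = [
--         entry
--         for entry in mapping_data.values()
--         if entry.get("tvdb_id") == tvdb_id
--         and entry.get("tvdb_season") == season_number
--         and "mal_id" in entry
--     ]
--
--     if not matching_entries:
--         return None, None
--
--     # Sort entries by epoffset
--     matching_entries.sort(key=lambda x: x.get("tvdb_epoffset", 0))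
--
--     # Find the appropriate entry based on episode number
--     for i, entry in enumerate(matching_entries):
--         current_offset = entry.get("tvdb_epoffset", 0)
--         next_offset = float("inf")
--
--         if i < len(matching_entries) - 1:
--             next_offset = matching_entries[i + 1].get("tvdb_epoffset", float("inf"))
--
--         if episode_number > current_offset and (
--             episode_number <= next_offset or next_offset == float("inf")
--         ):
--             return entry["mal_id"], episode_number - current_offset
--
--     return None, None
-- ===== SOURCE B (Python) =====
-- def get_mal_id_from_tvdb(mapping_data, tvdb_id, season_number, episode_number):
--     """Find the appropriate MAL ID based on TVDB id.
--
--     Single pass, no sorting: keep the matching entry with the greatest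
--     epoffset strictly below episode_number (later entries win ties, which
--     is what A's stable sort yields).
--     """
--     best = None  # (entry, offset)
--     for entry in mapping_data.values():
--         if (
--             entry.get("tvdb_id") == tvdb_id
--             and entry.get("tvdb_season") == season_number
--             and "mal_id" in entry
--         ):
--             offset = entry.get("tvdb_epoffset", 0)
--             if offset < episode_number and (best is None or offset >= best[1]):
--                 best = (entry, offset)
--     if best is None:
--         return None, None
--     return best[0]["mal_id"], episode_number - best[1]
-- ===== Notes on version B (the rewrite author's own statement) =====
-- stated objective: simpler
-- what changed: Replaces A's sort-then-interval-scan with a single pass that keeps the matching entry with the greatest tvdb_epoffset strictly below episode_number (>= update so later dict-order ties win, matching A's stable sort); no sorting and no next-offset/inf logic.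
import Mathlib
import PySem

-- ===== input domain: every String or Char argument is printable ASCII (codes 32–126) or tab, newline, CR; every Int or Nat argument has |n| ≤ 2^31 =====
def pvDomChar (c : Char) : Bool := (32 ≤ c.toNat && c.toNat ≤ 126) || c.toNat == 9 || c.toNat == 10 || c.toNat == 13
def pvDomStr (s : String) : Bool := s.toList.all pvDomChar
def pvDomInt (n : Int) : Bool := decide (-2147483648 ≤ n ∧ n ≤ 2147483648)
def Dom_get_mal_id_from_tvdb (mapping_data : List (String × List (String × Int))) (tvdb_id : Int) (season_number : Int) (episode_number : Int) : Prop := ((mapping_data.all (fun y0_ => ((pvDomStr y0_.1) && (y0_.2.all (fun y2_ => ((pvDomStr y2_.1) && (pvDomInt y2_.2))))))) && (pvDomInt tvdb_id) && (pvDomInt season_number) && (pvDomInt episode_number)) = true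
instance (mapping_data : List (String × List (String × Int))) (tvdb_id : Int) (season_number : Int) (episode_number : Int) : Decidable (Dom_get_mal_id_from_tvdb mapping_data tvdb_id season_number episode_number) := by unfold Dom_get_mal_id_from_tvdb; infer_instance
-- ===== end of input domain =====

-- ===== PORT A =====
-- B changes: single forward pass keeping the best (greatest-offset-below-episode) matching
-- entry instead of A's sort-then-interval-scan (objective: simpler); equal on every input
-- admitted by Pre_ (see the comment above Pre_get_mal_id_from_tvdb).

-- entry.get(k) on an inner dict (first match in the association list)
def entGet (en : List (String × Int)) (k : String) : Option Int :=
  (en.find? (fun p => p.1 == k)).map (·.2)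

-- entry.get("tvdb_epoffset", 0)
def entOffD (en : List (String × Int)) : Int :=
  (entGet en "tvdb_epoffset").getD 0

-- the filter of A's list comprehension / B's if: matching tvdb_id, tvdb_season, has mal_id
def entMatch (tvdb_id season_number : Int) (en : List (String × Int)) : Bool :=
  entGet en "tvdb_id" == some tvdb_id &&
  entGet en "tvdb_season" == some season_number &&
  (entGet en "mal_id").isSome

-- [entry for entry in mapping_data.values() if …]
def matchingOf (mapping_data : List (String × List (String × Int))) (tvdb_id season_number : Int) :
    List (List (String × Int)) :=
  (mapping_data.map Prod.snd).filter (fun en => entMatch tvdb_id season_number en)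

-- A's for-loop over the sorted matching entries; float("inf") for next_offset is ported as
-- `none` (exact: it only ever appears as "no next entry" / "next entry has no 'tvdb_epoffset'",
-- and `episode_number <= inf or inf == inf` is True, matched by the `none => true` branch)
def scanA (episode_number : Int) : List (List (String × Int)) → Option Int × Option Int
  | [] => (none, none)
  | en :: rest =>
    let cur := entOffD en
    let nxt : Option Int := match rest with
      | [] => none
      | nx :: _ => entGet nx "tvdb_epoffset"
    if decide (episode_number > cur) &&
        (match nxt with | none => true | some v => decide (episode_number ≤ v)) then
      (entGet en "mal_id", some (episode_number - cur))
    else scanA episode_number rest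

def get_mal_id_from_tvdb (mapping_data : List (String × List (String × Int))) (tvdb_id : Int) (season_number : Int) (episode_number : Int) : Option Int × Option Int :=
  let matching_entries := matchingOf mapping_data tvdb_id season_number
  if matching_entries.isEmpty then (none, none)
  else scanA episode_number (PySem.List.sorted matching_entries (fun x => entOffD x))

-- ===== PORT B =====
def get_mal_id_from_tvdb_alt (mapping_data : List (String × List (String × Int))) (tvdb_id : Int) (season_number : Int) (episode_number : Int) : Option Int × Option Int :=
  let best := (mapping_data.map Prod.snd).foldl
    (fun (acc : Option (List (String × Int) × Int)) en =>
      if entMatch tvdb_id season_number en then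
        let off := entOffD en
        if decide (off < episode_number) &&
            (match acc with | none => true | some b => decide (off ≥ b.2)) then
          some (en, off)
        else acc
      else acc) none
  match best with
  | none => (none, none)
  | some b => (entGet b.1 "mal_id", some (episode_number - b.2))

-- ===== PRECONDITION & SPEC =====
-- Pre_ excludes inputs where some MATCHING entry lacks the 'tvdb_epoffset' key: A still
-- returns there, but its sort keys such an entry as 0 while its next-entry look-ahead treats
-- it as infinity, so which matching entry it returns is an artefact of that look-ahead that a
-- natural re-implementation cannot match; B returns the entry with the greatest epoffset
-- (missing = 0) below episode_number there.
def Pre_get_mal_id_from_tvdb (mapping_data : List (String × List (String × Int))) (tvdb_id : Int) (season_number : Int) (episode_number : Int) : Prop :=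
  ∀ m ∈ matchingOf mapping_data tvdb_id season_number, (entGet m "tvdb_epoffset").isSome = true
instance (mapping_data : List (String × List (String × Int))) (tvdb_id : Int) (season_number : Int) (episode_number : Int) : Decidable (Pre_get_mal_id_from_tvdb mapping_data tvdb_id season_number episode_number) := by unfold Pre_get_mal_id_from_tvdb; infer_instance

def pvWitness_get_mal_id_from_tvdb : (List (String × List (String × Int))) × Int × Int × Int :=
  ([("a", [("tvdb_id", 1), ("tvdb_season", 1), ("mal_id", 10), ("tvdb_epoffset", -1)]),
    ("b", [("tvdb_id", 1), ("tvdb_season", 1), ("mal_id", 20), ("tvdb_epoffset", 0)]),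
    ("c", [("tvdb_id", 1), ("tvdb_season", 1), ("mal_id", 30), ("tvdb_epoffset", 5)])], 1, 1, 10)

def Spec_get_mal_id_from_tvdb (mapping_data : List (String × List (String × Int))) (tvdb_id : Int) (season_number : Int) (episode_number : Int) (out : Option Int × Option Int) : Prop := out = get_mal_id_from_tvdb_alt mapping_data tvdb_id season_number episode_number
instance (mapping_data : List (String × List (String × Int))) (tvdb_id : Int) (season_number : Int) (episode_number : Int) (out : Option Int × Option Int) : Decidable (Spec_get_mal_id_from_tvdb mapping_data tvdb_id season_number episode_number out) := by unfold Spec_get_mal_id_from_tvdb; infer_instance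

-- ===== CLAIM (what is proved, stated in full; the proofs are below) =====
def Claim_equal_get_mal_id_from_tvdb : Prop := ∀ (mapping_data : List (String × List (String × Int))) (tvdb_id : Int) (season_number : Int) (episode_number : Int), Dom_get_mal_id_from_tvdb mapping_data tvdb_id season_number episode_number → Pre_get_mal_id_from_tvdb mapping_data tvdb_id season_number episode_number → Spec_get_mal_id_from_tvdb mapping_data tvdb_id season_number episode_number (get_mal_id_from_tvdb mapping_data tvdb_id season_number episode_number)

-- ===== LEMMAS AND PROOFS =====

-- the comparison PySem's stable insertion sort uses for A's key
def pvBef (a b : List (String × Int)) : Bool := decide (entOffD a < entOffD b)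

-- the fold step of B after stripping both acc-independent filters
def pvUpd (acc : Option (List (String × Int) × Int)) (en : List (String × Int)) :
    Option (List (String × Int) × Int) :=
  if (match acc with | none => true | some b => decide (entOffD en ≥ b.2)) then
    some (en, entOffD en)
  else acc

theorem insertBy_nil (x : List (String × Int)) :
    PySem.List.insertBy pvBef x [] = [x] := rfl

theorem insertBy_cons (x y : List (String × Int)) (ys : List (List (String × Int))) :
    PySem.List.insertBy pvBef x (y :: ys) =
      if pvBef x y then x :: y :: ys else y :: PySem.List.insertBy pvBef x ys := rfl

theorem insertBy_ne_nil (x : List (String × Int)) (ys : List (List (String × Int))) :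
    PySem.List.insertBy pvBef x ys ≠ [] := by
  cases ys with
  | nil => simp [insertBy_nil]
  | cons y t => rw [insertBy_cons]; split <;> simp

theorem getLast?_insertBy_mem (x : List (String × Int)) (ys : List (List (String × Int)))
    (h : ∃ y ∈ ys, pvBef x y = true) :
    (PySem.List.insertBy pvBef x ys).getLast? = ys.getLast? := by
  induction ys with
  | nil => simp at h
  | cons z t ih =>
    rw [insertBy_cons]
    by_cases hz : pvBef x z = true
    · simp [hz, List.getLast?_cons_cons]
    · rw [if_neg (by simp [hz])]
      have ht : ∃ y ∈ t, pvBef x y = true := by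
        rcases h with ⟨y, hy, hby⟩
        rcases List.mem_cons.mp hy with rfl | hyt
        · exact absurd hby hz
        · exact ⟨y, hyt, hby⟩
      rcases t with _ | ⟨a, t'⟩
      · simp at ht
      · rw [List.getLast?_cons_cons, ← ih ht]
        rcases hrepr : PySem.List.insertBy pvBef x (a :: t') with _ | ⟨b, bs⟩
        · exact absurd hrepr (insertBy_ne_nil x (a :: t'))
        · rw [List.getLast?_cons_cons]

theorem insertBy_all_before (x : List (String × Int)) (ys : List (List (String × Int)))
    (h : ∀ y ∈ ys, pvBef x y = true) :
    PySem.List.insertBy pvBef x ys = x :: ys := by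
  cases ys with
  | nil => rfl
  | cons z t => rw [insertBy_cons, if_pos (h z (by simp))]

theorem sorted_append_singleton (C : List (List (String × Int))) (x : List (String × Int)) :
    PySem.List.sorted (C ++ [x]) (fun e => entOffD e) =
      PySem.List.insertBy pvBef x (PySem.List.sorted C (fun e => entOffD e)) := by
  rw [PySem.List.sorted_eq_foldl_insertBy, PySem.List.sorted_eq_foldl_insertBy,
    List.foldl_append]
  rfl

theorem filter_insertBy (p : List (String × Int) → Bool) (x : List (String × Int))
    (ys : List (List (String × Int)))
    (hs : ys.Pairwise (fun a b => entOffD a ≤ entOffD b)) :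
    (PySem.List.insertBy pvBef x ys).filter p =
      if p x then PySem.List.insertBy pvBef x (ys.filter p) else ys.filter p := by
  induction ys with
  | nil => cases hpx : p x <;> simp [insertBy_nil, List.filter, hpx]
  | cons z t ih =>
    have hpt : t.Pairwise (fun a b => entOffD a ≤ entOffD b) := (List.pairwise_cons.mp hs).2
    have hzall : ∀ y ∈ t, entOffD z ≤ entOffD y := (List.pairwise_cons.mp hs).1
    rw [insertBy_cons]
    by_cases hbz : pvBef x z = true
    · rw [if_pos hbz]
      cases hpx : p x with
      | true =>
        cases hpz : p z with
        | true =>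
          simp only [List.filter_cons, hpx, hpz, if_true]
          rw [insertBy_cons, if_pos hbz]
        | false =>
          simp only [List.filter_cons, hpx, hpz, if_true, Bool.false_eq_true, if_false]
          rw [insertBy_all_before]
          intro y hy
          have hyt : y ∈ t := List.mem_of_mem_filter hy
          have h1 : entOffD x < entOffD z := of_decide_eq_true hbz
          have h2 : entOffD z ≤ entOffD y := hzall y hyt
          exact decide_eq_true (by omega)
      | false =>
        simp [List.filter_cons, hpx]
    · rw [if_neg (by simp [hbz])]
      cases hpx : p x with
      | true =>
        cases hpz : p z with
        | true =>
          simp only [List.filter_cons, hpz, if_true]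
          rw [ih hpt, if_pos hpx, insertBy_cons, if_neg (by simp [hbz])]
        | false =>
          simp only [List.filter_cons, hpz, Bool.false_eq_true, if_false]
          rw [ih hpt]
          simp [hpx]
      | false =>
        cases hpz : p z with
        | true =>
          simp only [List.filter_cons, hpz, if_true]
          rw [ih hpt]
          simp [hpx]
        | false =>
          simp only [List.filter_cons, hpz, Bool.false_eq_true, if_false]
          rw [ih hpt]
          simp [hpx]

theorem filter_sorted (p : List (String × Int) → Bool) (C : List (List (String × Int))) :
    (PySem.List.sorted C (fun e => entOffD e)).filter p =
      PySem.List.sorted (C.filter p) (fun e => entOffD e) := by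
  induction C using List.reverseRecOn with
  | nil => rfl
  | append_singleton C x ih =>
    rw [sorted_append_singleton, filter_insertBy p x _ (PySem.List.sorted_pairwise C _),
      List.filter_append]
    cases hpx : p x with
    | true =>
      simp only [List.filter_cons, hpx, if_true, List.filter_nil]
      rw [ih, sorted_append_singleton]
    | false =>
      simp only [List.filter_cons, hpx, Bool.false_eq_true, if_false, List.filter_nil,
        List.append_nil]
      exact ih

-- characterisation of B's accumulator fold over an arbitrary list C
theorem fold_upd_spec (C : List (List (String × Int))) :
    (C = [] ∧ C.foldl pvUpd none = none) ∨
    ∃ b, C.foldl pvUpd none = some b ∧ b.2 = entOffD b.1 ∧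
      (∀ y ∈ C, entOffD y ≤ b.2) ∧
      (PySem.List.sorted C (fun e => entOffD e)).getLast? = some b.1 := by
  induction C using List.reverseRecOn with
  | nil => exact Or.inl ⟨rfl, rfl⟩
  | append_singleton C x ih =>
    right
    rw [List.foldl_append]
    rcases ih with ⟨rfl, hnone⟩ | ⟨b, hb, hb2, hmax, hlast⟩
    · refine ⟨(x, entOffD x), ?_, rfl, ?_, ?_⟩
      · rw [hnone]; rfl
      · intro y hy; simp at hy; subst hy; exact le_refl _
      · rfl
    · rw [hb]
      simp only [List.foldl_cons, List.foldl_nil]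
      by_cases hle : b.2 ≤ entOffD x
      · have hupd : pvUpd (some b) x = some (x, entOffD x) := by
          simp [pvUpd, hle]
        rw [hupd]
        refine ⟨(x, entOffD x), rfl, rfl, ?_, ?_⟩
        · intro y hy
          rcases List.mem_append.mp hy with hyC | hyx
          · exact le_trans (hmax y hyC) hle
          · simp at hyx; subst hyx; exact le_refl _
        · rw [sorted_append_singleton]
          have hall : ∀ y ∈ PySem.List.sorted C (fun e => entOffD e), pvBef x y = false := by
            intro y hy
            have hyC : y ∈ C := (PySem.List.mem_sorted _ _ _ _).mp hy
            have := hmax y hyC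
            simp only [pvBef, decide_eq_false_iff_not, not_lt]
            omega
          rw [PySem.List.insertBy_of_forall_not_before _ _ _ hall]
          simp
      · have hupd : pvUpd (some b) x = some b := by
          simp only [pvUpd, ge_iff_le]
          rw [if_neg (by simpa using hle)]
        rw [hupd]
        refine ⟨b, rfl, hb2, ?_, ?_⟩
        · intro y hy
          rcases List.mem_append.mp hy with hyC | hyx
          · exact hmax y hyC
          · simp at hyx; subst hyx; omega
        · rw [sorted_append_singleton, getLast?_insertBy_mem]
          · exact hlast
          · exact ⟨b.1, List.mem_of_getLast? hlast, decide_eq_true (by omega)⟩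

theorem scanA_cons_cons (e : Int) (en nx : List (String × Int)) (t : List (List (String × Int))) :
    scanA e (en :: nx :: t) =
      if (decide (e > entOffD en) &&
          (match entGet nx "tvdb_epoffset" with
            | none => true | some v => decide (e ≤ v))) = true then
        (entGet en "mal_id", some (e - entOffD en))
      else scanA e (nx :: t) := rfl

-- A's scan on a key-sound sorted list returns the last entry with offset below e
theorem scanA_sorted (e : Int) (s : List (List (String × Int)))
    (hp : s.Pairwise (fun a b => entOffD a ≤ entOffD b))
    (hk : ∀ x ∈ s.tail, (entGet x "tvdb_epoffset").isSome = true) :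
    scanA e s =
      match (s.filter (fun en => decide (entOffD en < e))).getLast? with
      | none => (none, none)
      | some b => (entGet b "mal_id", some (e - entOffD b)) := by
  induction s with
  | nil => rfl
  | cons en rest ih =>
    have hprest : rest.Pairwise (fun a b => entOffD a ≤ entOffD b) := (List.pairwise_cons.mp hp).2
    have henall : ∀ y ∈ rest, entOffD en ≤ entOffD y := (List.pairwise_cons.mp hp).1
    have hkrest : ∀ x ∈ rest, (entGet x "tvdb_epoffset").isSome = true := by
      intro x hx; exact hk x (by simpa using hx)
    cases rest with
    | nil =>
      by_cases hcur : entOffD en < e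
      · simp only [scanA]
        rw [if_pos (by simp [hcur])]
        rw [List.filter_cons, if_pos (by simpa using hcur), List.filter_nil]
        rfl
      · simp only [scanA]
        rw [if_neg (by simp; omega)]
        rw [List.filter_cons, if_neg (by simpa using hcur), List.filter_nil]
        rfl
    | cons nx t =>
      have hnx : (entGet nx "tvdb_epoffset").isSome = true := hkrest nx (by simp)
      rcases hv : entGet nx "tvdb_epoffset" with _ | v
      · rw [hv] at hnx; simp at hnx
      have hoffnx : entOffD nx = v := by simp [entOffD, hv]
      have hktail : ∀ x ∈ (nx :: t).tail, (entGet x "tvdb_epoffset").isSome = true := by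
        intro x hx
        exact hkrest x (List.mem_of_mem_tail hx)
      by_cases hcur : entOffD en < e
      · by_cases hnext : e ≤ v
        · -- A returns this entry; everything behind it has offset ≥ e
          rw [scanA_cons_cons, hv]
          rw [if_pos (by simp; exact ⟨by omega, hnext⟩)]
          have h1 : ∀ a ∈ nx :: t, ¬ (entOffD a < e) := by
            intro a ha
            rcases List.mem_cons.mp ha with rfl | hat
            · omega
            · have h2 := (List.pairwise_cons.mp hprest).1 a hat
              omega
          have h2 : (nx :: t).filter (fun en => decide (entOffD en < e)) = [] :=
            List.filter_eq_nil_iff.mpr (fun a ha => by simpa using h1 a ha)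
          rw [List.filter_cons, h2, if_pos (by simpa using hcur)]
          rfl
        · -- next offset is below e: A skips this entry
          rw [scanA_cons_cons, hv]
          rw [if_neg (by simp; intro _; omega)]
          rw [ih hprest hktail]
          conv_rhs => rw [List.filter_cons, if_pos (by simpa using hcur)]
          have hne : (nx :: t).filter (fun en => decide (entOffD en < e)) ≠ [] := by
            intro hnil
            have : nx ∈ (nx :: t).filter (fun en => decide (entOffD en < e)) := by
              simp only [List.mem_filter]
              exact ⟨by simp, by simp; omega⟩
            rw [hnil] at this; simp at this
          rcases hrepr : (nx :: t).filter (fun en => decide (entOffD en < e)) with _ | ⟨a, t'⟩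
          · exact absurd hrepr hne
          · rw [List.getLast?_cons_cons]
      · -- this entry's offset is already ≥ e: skipped and filtered out
        rw [scanA_cons_cons, hv]
        rw [if_neg (by simp; intro hc; omega)]
        rw [ih hprest hktail]
        conv_rhs => rw [List.filter_cons, if_neg (by simpa using hcur)]

-- B's fold over mapping_data.values() equals the pvUpd fold over the doubly filtered list
theorem alt_eq_fold (mapping_data : List (String × List (String × Int)))
    (tvdb_id season_number episode_number : Int) :
    get_mal_id_from_tvdb_alt mapping_data tvdb_id season_number episode_number =
      match ((matchingOf mapping_data tvdb_id season_number).filter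
          (fun en => decide (entOffD en < episode_number))).foldl pvUpd none with
      | none => (none, none)
      | some b => (entGet b.1 "mal_id", some (episode_number - b.2)) := by
  unfold get_mal_id_from_tvdb_alt matchingOf
  rw [List.foldl_filter, List.foldl_filter]
  have hfun : (fun (acc : Option (List (String × Int) × Int)) en =>
        if entMatch tvdb_id season_number en then
          let off := entOffD en
          if decide (off < episode_number) &&
              (match acc with | none => true | some b => decide (off ≥ b.2)) then
            some (en, off)
          else acc
        else acc) =
      (fun (acc : Option (List (String × Int) × Int)) en =>
        if entMatch tvdb_id season_number en = true then
          if decide (entOffD en < episode_number) = true then pvUpd acc en else acc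
        else acc) := by
    funext acc en
    by_cases hm : entMatch tvdb_id season_number en = true
    · simp only [hm, if_true]
      by_cases hoff : entOffD en < episode_number
      · simp only [decide_eq_true hoff, if_true, pvUpd, Bool.true_and]
      · simp only [decide_eq_false hoff, Bool.false_and, Bool.false_eq_true, if_false]
    · simp [hm]
  rw [hfun]

-- ===== VERDICT (by name: the statement is the Claim_ definition above) =====
theorem get_mal_id_from_tvdb_spec : Claim_equal_get_mal_id_from_tvdb := by
  intro mapping_data tvdb_id season_number episode_number _ hpre
  unfold Spec_get_mal_id_from_tvdb
  rw [alt_eq_fold]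
  simp only [get_mal_id_from_tvdb]
  unfold Pre_get_mal_id_from_tvdb at hpre
  generalize hM : matchingOf mapping_data tvdb_id season_number = M at *
  by_cases hMnil : M = []
  · subst hMnil
    rfl
  · rw [if_neg (by simp [hMnil])]
    have hkeys : ∀ x ∈ (PySem.List.sorted M (fun e => entOffD e)).tail,
        (entGet x "tvdb_epoffset").isSome = true := fun x hx =>
      hpre x ((PySem.List.mem_sorted _ _ _ _).mp (List.mem_of_mem_tail hx))
    rw [scanA_sorted episode_number _ (PySem.List.sorted_pairwise M _) hkeys]
    rw [filter_sorted]
    rcases fold_upd_spec (M.filter (fun en => decide (entOffD en < episode_number))) with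
      ⟨hnil, hnone⟩ | ⟨b, hbfold, hb2, _, hlast⟩
    · rw [hnil]; rfl
    · rw [hbfold, hlast]
      simp [hb2]
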